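-- pv_equiv track=rewrite | github.com/Platon17/MindMathGames | services/simm.py | str_to_m
-- ===== SOURCE A (Python) =====
-- def str_to_m(m_str:str)->list[bool]:
-- 	dm: list[bool] = []   # матрицы
-- 	c = 0  # количество колонок
-- 	lines: list = m_str.split('\n')
-- 	for line in lines:
-- 		sm: list[bool] = []  # строка матрицы [True,False]
-- 		cs = 0  # количество символов в строке
-- 		for ch in line:  # перебираем символы в строке
-- 			if (ch.isdigit()) and (ch != '0'):  # если цифра и не 0
-- 				n = int(ch)  # количество пустых клеток
-- 				cs += n  # увеличим количество символов в строке на n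
-- 				for j in range(n):  # n пустых клеток
-- 					sm.append(False)
-- 			else:
-- 				cs += 1  # количество символов в строке на 1
-- 				if ch == '+':  # если + то, это клетка фигуры
-- 					sm.append(True)
-- 				else:  # иначе пустая клетка
-- 					sm.append(False)
-- 		if cs > c: c = cs  # максимально длинную строку храним в с
-- 		dm.append(sm)  # добавляем строку матрицы в исходную матрицу
-- 	return dm
-- ===== SOURCE B (Python) =====
-- def str_to_m(m_str: str) -> list[bool]:
--     rows = []
--     for line in m_str.split('\n'):
--         # phase 1: expand each digit 1-9 into that many spaces
--         expanded = ''.join(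
--             ' ' * int(ch) if ch.isdigit() and ch != '0' else ch
--             for ch in line)
--         # phase 2: uniform boolean mapping
--         rows.append([ch == '+' for ch in expanded])
--     return rows
-- ===== Notes on version B (the rewrite author's own statement) =====
-- stated objective: simpler
-- what changed: Replaces the single nested branchy loop with dead max-length bookkeeping by a two-phase per-line pipeline: first expand digit characters into runs of spaces, then uniformly map every character to (ch == '+').
import Mathlib
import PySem

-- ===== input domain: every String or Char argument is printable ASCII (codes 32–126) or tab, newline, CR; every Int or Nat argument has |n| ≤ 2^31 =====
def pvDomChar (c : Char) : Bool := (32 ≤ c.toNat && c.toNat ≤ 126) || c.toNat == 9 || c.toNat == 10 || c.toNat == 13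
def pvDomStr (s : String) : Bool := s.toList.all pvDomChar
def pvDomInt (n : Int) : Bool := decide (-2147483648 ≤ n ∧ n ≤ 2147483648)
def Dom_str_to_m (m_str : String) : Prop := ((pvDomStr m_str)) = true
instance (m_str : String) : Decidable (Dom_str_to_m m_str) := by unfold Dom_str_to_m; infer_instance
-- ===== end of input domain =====

-- B replaces A's single nested branchy loop (with dead max-length bookkeeping) by a
-- two-phase per-line pipeline: expand digits to spaces, then map every char to (ch == '+'). Objective: simpler.

-- ===== PORT A =====
-- literal transliteration of A: foldl over lines carrying (dm, c); inner foldl over chars carrying (sm, cs).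
-- m_str.split('\n'): split? is none only for sep = "", so getD [] is never the default here.
-- int(ch): ofStr? is some on every ch this branch reaches; getD 0 is never the default.
def str_to_m (m_str : String) : List (List Bool) :=
  (((PySem.Str.split? m_str "\n").getD []).foldl
    (fun (st : List (List Bool) × Int) line =>
      let inner := line.toList.foldl
        (fun (st2 : List Bool × Int) ch =>
          if PySem.Chars.isdigit ch && !(ch == '0') then
            let n : Int := (PySem.Int.ofStr? (String.singleton ch)).getD 0
            ((PySem.List.pyRange 0 n 1).foldl (fun s _ => s ++ [false]) st2.1, st2.2 + n)
          else
            (st2.1 ++ [if ch == '+' then true else false], st2.2 + 1))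
        ([], 0)
      (st.1 ++ [inner.1], if inner.2 > st.2 then inner.2 else st.2))
    ([], (0 : Int))).1

-- ===== PORT B =====
-- phase 1 of Source B: expand each digit 1-9 into that many spaces
def pvExpandLine (line : List Char) : List Char :=
  line.flatMap (fun ch =>
    if PySem.Chars.isdigit ch && !(ch == '0') then
      List.replicate ((PySem.Int.ofStr? (String.singleton ch)).getD 0).toNat ' '
    else [ch])

def str_to_m_alt (m_str : String) : List (List Bool) :=
  ((PySem.Str.split? m_str "\n").getD []).map
    (fun line => (pvExpandLine line.toList).map (fun ch => ch == '+'))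

-- ===== PRECONDITION & SPEC =====
def Spec_str_to_m (m_str : String) (out : List (List Bool)) : Prop := out = str_to_m_alt m_str
instance (m_str : String) (out : List (List Bool)) : Decidable (Spec_str_to_m m_str out) := by unfold Spec_str_to_m; infer_instance

-- ===== CLAIM (what is proved, stated in full; the proofs are below) =====
def Claim_equal_str_to_m : Prop := ∀ (m_str : String), Dom_str_to_m m_str → Spec_str_to_m m_str (str_to_m m_str)

-- ===== LEMMAS AND PROOFS =====

-- appending k falses one by one = appending replicate k false
theorem pv_foldl_append_false (l : List Int) (s : List Bool) :
    l.foldl (fun s _ => s ++ [false]) s = s ++ List.replicate l.length false := by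
  induction l generalizing s with
  | nil => simp
  | cons x xs ih =>
    rw [List.foldl_cons, ih, List.length_cons, List.replicate_succ]
    simp

-- A's inner char loop, started from (sm, k), builds sm ++ B's per-line row
theorem pv_inner (cs : List Char) (sm : List Bool) (k : Int) :
    (cs.foldl
      (fun (st2 : List Bool × Int) ch =>
        if PySem.Chars.isdigit ch && !(ch == '0') then
          let n : Int := (PySem.Int.ofStr? (String.singleton ch)).getD 0
          ((PySem.List.pyRange 0 n 1).foldl (fun s _ => s ++ [false]) st2.1, st2.2 + n)
        else
          (st2.1 ++ [if ch == '+' then true else false], st2.2 + 1))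
      (sm, k)).1
    = sm ++ (pvExpandLine cs).map (fun ch => ch == '+') := by
  induction cs generalizing sm k with
  | nil => simp [pvExpandLine]
  | cons c cs ih =>
    rw [List.foldl_cons]
    by_cases h : (PySem.Chars.isdigit c && !(c == '0')) = true
    · have hsp : (' ' == '+') = false := by decide
      simp only [h, if_true]
      rw [pv_foldl_append_false, ih]
      simp [pvExpandLine, PySem.List.length_pyRange_one]
      have h' : PySem.Chars.isdigit c = true ∧ ¬c = '0' := by simpa using h
      rw [if_pos h', List.map_replicate, hsp]
    · simp only [h]
      rw [ih]
      simp only [pvExpandLine, List.flatMap_cons]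
      rw [if_neg h]
      by_cases hp : (c == '+') = true <;> simp [hp]

-- A's outer loop, started from (dm, c), builds dm ++ B's rows
theorem pv_outer (lines : List String) (dm : List (List Bool)) (c : Int) :
    ((lines.foldl
      (fun (st : List (List Bool) × Int) line =>
        let inner := line.toList.foldl
          (fun (st2 : List Bool × Int) ch =>
            if PySem.Chars.isdigit ch && !(ch == '0') then
              let n : Int := (PySem.Int.ofStr? (String.singleton ch)).getD 0
              ((PySem.List.pyRange 0 n 1).foldl (fun s _ => s ++ [false]) st2.1, st2.2 + n)
            else
              (st2.1 ++ [if ch == '+' then true else false], st2.2 + 1))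
          ([], 0)
        (st.1 ++ [inner.1], if inner.2 > st.2 then inner.2 else st.2))
      (dm, c)).1)
    = dm ++ lines.map (fun line => (pvExpandLine line.toList).map (fun ch => ch == '+')) := by
  induction lines generalizing dm c with
  | nil => simp
  | cons l ls ih =>
    rw [List.foldl_cons, ih]
    rw [pv_inner l.toList [] 0]
    simp

-- ===== VERDICT (by name: the statement is the Claim_ definition above) =====
theorem str_to_m_spec : Claim_equal_str_to_m := by
  intro m_str _
  unfold Spec_str_to_m str_to_m str_to_m_alt
  rw [pv_outer]
  simp
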